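-- pv_equiv track=rewrite | github.com/Justin-Bolivar/SpeakBright_API_fastAPI | utils.py | predict_full_sentence
-- ===== SOURCE A (Python) =====
-- def predict_word_between(word1, word2, trigram_freq, bigram_freq, default_word="am"):
--     # Predict from trigram
--     candidates = [trigram for trigram in trigram_freq if trigram[0] == word1 and trigram[2] == word2]
--
--     if candidates:
--         best_trigram = max(candidates, key=lambda trigram: trigram_freq[trigram])
--         return best_trigram[1]
--
--     # if not found go to bigram
--     candidates = [bigram for bigram in bigram_freq if bigram[0] == word1]
--
--     if candidates:
--         best_bigram = max(candidates, key=lambda bigram: bigram_freq[bigram])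
--         return best_bigram[1]
--
--     # if no match use default_word which is "am"
--     return default_word
--
-- def predict_full_sentence(words, trigram_freq, bigram_freq):
--     result = [words[0]]  # Start with the first word
--
--     for i in range(len(words) - 1):
--         word1 = words[i]
--         word2 = words[i + 1]
--
--         # Try predicting a word between the two words
--         predicted_word = predict_word_between(word1, word2, trigram_freq, bigram_freq)
--
--         # Append the predicted word (if any) and the next word
--         if predicted_word:
--             result.append(predicted_word)
--         result.append(word2)
--
--     return ' '.join(result)
-- ===== SOURCE B (Python) =====
-- def predict_full_sentence(words, trigram_freq, bigram_freq):
--     # Precompute best-candidate tables in one pass each (skipping entries that are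
--     # not genuine trigrams/bigrams), then O(1) lookups per adjacent word pair.
--     tri_best = {}  # (w1, w3) -> (count, middle word)
--     for key, cnt in trigram_freq.items():
--         if len(key) < 3:
--             continue
--         pair = (key[0], key[2])
--         cur = tri_best.get(pair)
--         if cur is None or cnt > cur[0]:
--             tri_best[pair] = (cnt, key[1])
--     bi_best = {}  # w1 -> (count, successor word)
--     for key, cnt in bigram_freq.items():
--         if len(key) < 2:
--             continue
--         cur = bi_best.get(key[0])
--         if cur is None or cnt > cur[0]:
--             bi_best[key[0]] = (cnt, key[1])
--     parts = [words[0]]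
--     for w1, w2 in zip(words, words[1:]):
--         entry = tri_best.get((w1, w2))
--         if entry is None:
--             entry = bi_best.get(w1)
--         mid = entry[1] if entry is not None else "am"
--         if mid:
--             parts.append(mid)
--         parts.append(w2)
--     return ' '.join(parts)
-- ===== Notes on version B (the rewrite author's own statement) =====
-- stated objective: faster
-- what changed: Instead of rescanning all trigram/bigram keys for every adjacent word pair, B builds a (w1,w3)->best-middle table and a w1->best-successor table in one pass each (skipping malformed keys) and then does O(1) lookups per pair.
-- outside the precondition, e.g. on predict_full_sentence(['a', 'b'], {('a', 'x', 'b'): 1}, {(): 1}): A returns 'a x b', B returns 'a x b'; on predict_full_sentence(['a', 'b'], {}, {('a',): 1, ('a', 'c'): 5}): A returns 'a c b', B returns 'a c b'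
import Mathlib
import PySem

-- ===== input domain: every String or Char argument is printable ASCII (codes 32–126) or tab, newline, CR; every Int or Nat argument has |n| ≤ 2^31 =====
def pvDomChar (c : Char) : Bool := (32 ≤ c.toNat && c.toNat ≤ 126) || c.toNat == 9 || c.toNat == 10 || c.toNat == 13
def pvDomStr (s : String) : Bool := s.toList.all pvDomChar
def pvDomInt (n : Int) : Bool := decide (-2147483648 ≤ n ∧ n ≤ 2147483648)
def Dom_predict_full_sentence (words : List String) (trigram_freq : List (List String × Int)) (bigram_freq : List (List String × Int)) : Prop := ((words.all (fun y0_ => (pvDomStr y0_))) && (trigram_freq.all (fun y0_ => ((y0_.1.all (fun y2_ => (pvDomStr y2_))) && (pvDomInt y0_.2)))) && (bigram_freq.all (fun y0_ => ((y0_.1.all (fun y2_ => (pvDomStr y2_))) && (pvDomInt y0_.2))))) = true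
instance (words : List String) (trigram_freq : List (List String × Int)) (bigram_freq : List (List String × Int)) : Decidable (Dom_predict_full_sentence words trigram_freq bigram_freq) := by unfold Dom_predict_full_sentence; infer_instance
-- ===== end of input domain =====

-- B replaces A's per-pair rescans of the trigram/bigram tables by two precomputed
-- best-candidate dictionaries with O(1) lookups per word pair (objective: faster).


-- ===== PORT A =====
-- predict_word_between: scan all trigram keys for (word1, _, word2), else all bigram
-- keys for (word1, _), else the default word; max picks the first key with maximal count.
def pfs_predict_word_between (word1 word2 : String)
    (trigram_freq bigram_freq : PySem.Dict (List String) Int) (default_word : String) : String :=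
  let candidates := trigram_freq.keys.filter
    (fun t => PySem.List.pyGetD t 0 "" == word1 && PySem.List.pyGetD t 2 "" == word2)
  match PySem.List.max? candidates (fun t => trigram_freq.getD t 0) with
  | some best => PySem.List.pyGetD best 1 ""
  | none =>
    let candidates := bigram_freq.keys.filter (fun b => PySem.List.pyGetD b 0 "" == word1)
    match PySem.List.max? candidates (fun b => bigram_freq.getD b 0) with
    | some best => PySem.List.pyGetD best 1 ""
    | none => default_word

def predict_full_sentence (words : List String) (trigram_freq : List (List String × Int)) (bigram_freq : List (List String × Int)) : String :=
  let tf := PySem.Dict.ofList trigram_freq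
  let bf := PySem.Dict.ofList bigram_freq
  let result := [PySem.List.pyGetD words 0 ""]
  let result := (List.range (words.length - 1)).foldl (fun res (i : Nat) =>
      let word1 := PySem.List.pyGetD words (i : Int) ""
      let word2 := PySem.List.pyGetD words ((i : Int) + 1) ""
      let predicted := pfs_predict_word_between word1 word2 tf bf "am"
      (if predicted ≠ "" then res ++ [predicted] else res) ++ [word2]) result
  PySem.Str.join " " result

-- ===== PORT B =====
-- One pass over the items; keep, per derived key, the entry with the strictly greatest
-- count (first one wins ties) together with the key's second word.
def pfs_step {κ : Type} [BEq κ] (keyOf : List String → κ)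
    (d : PySem.Dict κ (Int × String)) (p : List String × Int) : PySem.Dict κ (Int × String) :=
  match d.get? (keyOf p.1) with
  | none => d.insert (keyOf p.1) (p.2, PySem.List.pyGetD p.1 1 "")
  | some cur =>
    if p.2 > cur.1 then d.insert (keyOf p.1) (p.2, PySem.List.pyGetD p.1 1 "") else d

def pfs_bestTable {κ : Type} [BEq κ] (items : List (List String × Int))
    (keyOf : List String → κ) : PySem.Dict κ (Int × String) :=
  items.foldl (pfs_step keyOf) PySem.Dict.empty

def predict_full_sentence_alt (words : List String) (trigram_freq : List (List String × Int)) (bigram_freq : List (List String × Int)) : String :=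
  let tri_best := pfs_bestTable
      ((PySem.Dict.ofList trigram_freq).items.filter (fun p => decide (3 ≤ p.1.length)))
      (fun k => (PySem.List.pyGetD k 0 "", PySem.List.pyGetD k 2 ""))
  let bi_best := pfs_bestTable
      ((PySem.Dict.ofList bigram_freq).items.filter (fun p => decide (2 ≤ p.1.length)))
      (fun k => PySem.List.pyGetD k 0 "")
  let parts := (words.zip (words.drop 1)).foldl (fun res wp =>
      let entry := match tri_best.get? (wp.1, wp.2) with
        | some e => some e
        | none => bi_best.get? wp.1
      let mid := match entry with | some e => e.2 | none => "am"
      (if mid ≠ "" then res ++ [mid] else res) ++ [wp.2]) [PySem.List.pyGetD words 0 ""]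
  PySem.Str.join " " parts

-- ===== PRECONDITION & SPEC =====
-- Pre_ excludes the inputs on which Python A raises IndexError (empty words, an empty
-- key, or a key that starts with some words[i] yet is too short to be indexed as a
-- trigram/bigram); it also over-excludes a few inputs where such a malformed key exists
-- but A happens never to index it (bigram table never scanned, or the short key loses
-- the max) — separating those would require simulating A's scan.
def Pre_predict_full_sentence (words : List String) (trigram_freq : List (List String × Int)) (bigram_freq : List (List String × Int)) : Prop :=
  words ≠ [] ∧
  (∀ p ∈ trigram_freq, p.1 ≠ [] ∧ (p.1.headI ∈ words.dropLast → 3 ≤ p.1.length)) ∧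
  (∀ p ∈ bigram_freq, p.1 ≠ [] ∧ (p.1.headI ∈ words.dropLast → 2 ≤ p.1.length))
instance (words : List String) (trigram_freq : List (List String × Int)) (bigram_freq : List (List String × Int)) : Decidable (Pre_predict_full_sentence words trigram_freq bigram_freq) := by unfold Pre_predict_full_sentence; infer_instance
def pvWitness_predict_full_sentence : List String × (List (List String × Int)) × (List (List String × Int)) :=
  (["i", "happy"], [(["i", "am", "happy"], 2), (["i", "so", "happy"], 1)], [(["i", "was"], 3)])
def Spec_predict_full_sentence (words : List String) (trigram_freq : List (List String × Int)) (bigram_freq : List (List String × Int)) (out : String) : Prop := out = predict_full_sentence_alt words trigram_freq bigram_freq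
instance (words : List String) (trigram_freq : List (List String × Int)) (bigram_freq : List (List String × Int)) (out : String) : Decidable (Spec_predict_full_sentence words trigram_freq bigram_freq out) := by unfold Spec_predict_full_sentence; infer_instance

-- ===== CLAIM (what is proved, stated in full; the proofs are below) =====
def Claim_equal_predict_full_sentence : Prop := ∀ (words : List String) (trigram_freq : List (List String × Int)) (bigram_freq : List (List String × Int)), Dom_predict_full_sentence words trigram_freq bigram_freq → Pre_predict_full_sentence words trigram_freq bigram_freq → Spec_predict_full_sentence words trigram_freq bigram_freq (predict_full_sentence words trigram_freq bigram_freq)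

-- ===== LEMMAS AND PROOFS =====

-- the per-key option-valued accumulator B's dictionary fold maintains at one key
def pfs_optStep (s : Option (Int × String)) (p : List String × Int) : Option (Int × String) :=
  match s with
  | none => some (p.2, PySem.List.pyGetD p.1 1 "")
  | some cur => if p.2 > cur.1 then some (p.2, PySem.List.pyGetD p.1 1 "") else some cur

-- B's dictionary fold, looked up at q, only sees the items whose derived key is q
lemma pfs_get?_foldl_step {κ : Type} [BEq κ] [LawfulBEq κ] [DecidableEq κ]
    (items : List (List String × Int)) (keyOf : List String → κ) (q : κ) :
    ∀ d : PySem.Dict κ (Int × String),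
      (items.foldl (pfs_step keyOf) d).get? q =
      (items.filter (fun p => keyOf p.1 == q)).foldl pfs_optStep (d.get? q) := by
  induction items with
  | nil => intro d; simp
  | cons a l ih =>
    intro d
    simp only [List.foldl_cons, List.filter_cons]
    rw [ih]
    by_cases hk : keyOf a.1 = q
    · simp only [hk, beq_self_eq_true, if_pos, List.foldl_cons]
      have hstep : (pfs_step keyOf d a).get? q = pfs_optStep (d.get? q) a := by
        cases h : d.get? q with
        | none => simp [pfs_step, pfs_optStep, hk, h]
        | some cur =>
          by_cases hgt : a.2 > cur.1
          · simp [pfs_step, pfs_optStep, hk, h, hgt]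
          · simp [pfs_step, pfs_optStep, hk, h, hgt]
      rw [hstep]
    · have hb : (keyOf a.1 == q) = false := by simp [hk]
      simp only [hb, Bool.false_eq_true, not_false_iff, if_neg]
      have hstep : (pfs_step keyOf d a).get? q = d.get? q := by
        cases h : d.get? (keyOf a.1) with
        | none => simp [pfs_step, h, PySem.Dict.get?_insert, Ne.symm hk]
        | some cur =>
          by_cases hgt : a.2 > cur.1
          · simp [pfs_step, h, hgt, PySem.Dict.get?_insert, Ne.symm hk]
          · simp [pfs_step, h, hgt]
      rw [hstep]

-- one step of Python's max, at the right end
lemma pfs_max?_snoc {α : Type} (l : List α) (a : α) (k : α → Int) :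
    PySem.List.max? (l ++ [a]) k =
    match PySem.List.max? l k with
    | none => some a
    | some m => if k m < k a then some a else some m := by
  simp only [PySem.List.max?, List.foldl_append, List.foldl_cons, List.foldl_nil]
  split <;> rename_i heq <;> simp [heq]

-- B's option fold is Python's max over counts, decorated with the middle word
lemma pfs_optfold_eq (fl : List (List String × Int)) :
    fl.foldl pfs_optStep none =
    (PySem.List.max? fl (fun p => p.2)).map (fun p => (p.2, PySem.List.pyGetD p.1 1 "")) := by
  induction fl using List.reverseRecOn with
  | nil => rfl
  | append_singleton l a ih =>
    rw [List.foldl_append, ih, pfs_max?_snoc]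
    cases hM : PySem.List.max? l (fun p => p.2) with
    | none => rfl
    | some m =>
      simp only [Option.map_some, List.foldl_cons, List.foldl_nil, pfs_optStep]
      by_cases h : m.2 < a.2
      · simp [h, gt_iff_lt]
      · simp [h, gt_iff_lt]

lemma pfs_max?_map {α β : Type} (l : List α) (f : α → β) (k : β → Int) :
    PySem.List.max? (l.map f) k = (PySem.List.max? l (fun a => k (f a))).map f := by
  induction l using List.reverseRecOn with
  | nil => rfl
  | append_singleton l a ih =>
    rw [List.map_append, List.map_singleton, pfs_max?_snoc, pfs_max?_snoc, ih]
    cases hM : PySem.List.max? l (fun a => k (f a)) with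
    | none => rfl
    | some m =>
      simp only [Option.map_some]
      by_cases h : k (f m) < k (f a) <;> simp [h]

lemma pfs_max?_congr {α : Type} (l : List α) (k1 k2 : α → Int)
    (h : ∀ x ∈ l, k1 x = k2 x) :
    PySem.List.max? l k1 = PySem.List.max? l k2 := by
  induction l using List.reverseRecOn with
  | nil => rfl
  | append_singleton l a ih =>
    have h' : ∀ x ∈ l, k1 x = k2 x := fun x hx => h x (by simp [hx])
    rw [pfs_max?_snoc, pfs_max?_snoc, ih h']
    cases hM : PySem.List.max? l k2 with
    | none => rfl
    | some m =>
      have hm : m ∈ l := PySem.List.max?_mem hM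
      simp only [h a (by simp), h m (by simp [hm])]

-- keys of a dict built from a pair list are first components of that list
lemma pfs_mem_keys_ofList {ps : List (List String × Int)} {k : List String}
    (h : k ∈ (PySem.Dict.ofList ps).keys) : ∃ v, (k, v) ∈ ps := by
  rw [PySem.Dict.ofList, PySem.Dict.update,
    PySem.Dict.keys_foldl_insert_key ps Prod.fst (fun _ p => p.2) PySem.Dict.empty,
    PySem.Dict.keys_empty] at h
  rcases (PySem.Set.mem_union _ _ _).mp h with h' | h'
  · simp at h'
  · rcases List.mem_map.mp h' with ⟨p, hp, hpk⟩
    exact ⟨p.2, by rw [← hpk]; exact hp⟩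

-- what B's filtered table answers at key q, phrased as A's filtered max over the keys
lemma pfs_table_get {κ : Type} [BEq κ] [LawfulBEq κ] [DecidableEq κ]
    (d : PySem.Dict (List String) Int) (hnd : d.keys.Nodup)
    (pk : List String → Bool) (keyOf : List String → κ) (q : κ) (pa : List String → Bool)
    (hpred : ∀ k ∈ d.keys, pa k = (pk k && (keyOf k == q))) :
    (pfs_bestTable (d.items.filter (fun p => pk p.1)) keyOf).get? q =
    (PySem.List.max? (d.keys.filter pa) (fun t => d.getD t 0)).map
      (fun t => (d.getD t 0, PySem.List.pyGetD t 1 "")) := by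
  rw [pfs_bestTable, pfs_get?_foldl_step, PySem.Dict.get?_empty, List.filter_filter,
    pfs_optfold_eq]
  have hfa : d.keys.filter pa =
      (d.items.filter (fun p => (keyOf p.1 == q) && pk p.1)).map Prod.fst := by
    rw [PySem.Dict.keys, List.filter_map]
    refine congrArg (List.map Prod.fst) (List.filter_congr ?_)
    intro p hp
    have hk : p.1 ∈ d.keys := by
      rw [PySem.Dict.keys]; exact List.mem_map_of_mem hp
    have := hpred p.1 hk
    simp only [Function.comp_apply, this, Bool.and_comm]
  rw [hfa, pfs_max?_map]
  have hk : ∀ p ∈ d.items.filter (fun p => (keyOf p.1 == q) && pk p.1),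
      (fun p : List String × Int => d.getD p.1 0) p = (fun p : List String × Int => p.2) p := by
    intro p hp
    have hmem : p ∈ d.items := List.mem_of_mem_filter hp
    exact PySem.Dict.getD_of_mem_items d (by cases p; exact hmem) hnd 0
  rw [pfs_max?_congr _ _ _ hk]
  cases hM : PySem.List.max? (d.items.filter (fun p => (keyOf p.1 == q) && pk p.1))
      (fun p : List String × Int => p.2) with
  | none => rfl
  | some m =>
    have hm : m ∈ d.items := List.mem_of_mem_filter (PySem.List.max?_mem hM)
    have : d.getD m.1 0 = m.2 := PySem.Dict.getD_of_mem_items d (by cases m; exact hm) hnd 0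
    simp [this]

-- a pair beq is the conjunction of the component beqs
lemma pfs_pair_beq (a b w1 w2 : String) :
    (((a, b) == (w1, w2)) : Bool) = (a == w1 && b == w2) := by
  rw [Bool.eq_iff_iff]
  simp [Prod.ext_iff]

-- a nonempty key whose head is not in words.dropLast: its pyGetD 0 is its head
lemma pfs_pyGetD_zero_headI {k : List String} (h : k ≠ []) :
    PySem.List.pyGetD k 0 "" = k.headI := by
  cases k with
  | nil => exact absurd rfl h
  | cons a t => simp [PySem.List.pyGetD_zero_cons]

-- per word pair, A's rescans and B's table lookups give the same middle word
lemma pfs_pair_eq (w1 w2 : String) (tf bf : List (List String × Int)) (words : List String)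
    (hw1 : w1 ∈ words.dropLast)
    (htf : ∀ p ∈ tf, p.1 ≠ [] ∧ (p.1.headI ∈ words.dropLast → 3 ≤ p.1.length))
    (hbf : ∀ p ∈ bf, p.1 ≠ [] ∧ (p.1.headI ∈ words.dropLast → 2 ≤ p.1.length)) :
    pfs_predict_word_between w1 w2 (PySem.Dict.ofList tf) (PySem.Dict.ofList bf) "am" =
    (match (match (pfs_bestTable
            ((PySem.Dict.ofList tf).items.filter (fun p => decide (3 ≤ p.1.length)))
            (fun k => (PySem.List.pyGetD k 0 "", PySem.List.pyGetD k 2 ""))).get? (w1, w2) with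
        | some e => some e
        | none => (pfs_bestTable
            ((PySem.Dict.ofList bf).items.filter (fun p => decide (2 ≤ p.1.length)))
            (fun k => PySem.List.pyGetD k 0 "")).get? w1) with
      | some e => e.2
      | none => "am") := by
  have hpredT : ∀ k ∈ (PySem.Dict.ofList tf).keys,
      (PySem.List.pyGetD k 0 "" == w1 && PySem.List.pyGetD k 2 "" == w2) =
      (decide (3 ≤ k.length) &&
        ((PySem.List.pyGetD k 0 "", PySem.List.pyGetD k 2 "") == (w1, w2))) := by
    intro k hk
    obtain ⟨v, hkv⟩ := pfs_mem_keys_ofList hk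
    obtain ⟨hne, hlen⟩ := htf _ hkv
    by_cases h3 : 3 ≤ k.length
    · simp [h3, pfs_pair_beq]
    · have h0 : (PySem.List.pyGetD k 0 "" == w1) = false := by
        rw [pfs_pyGetD_zero_headI hne]
        by_cases he : k.headI = w1
        · exact absurd (hlen (he ▸ hw1)) h3
        · simp [he]
      simp [h3, h0]
  have hpredB : ∀ k ∈ (PySem.Dict.ofList bf).keys,
      (PySem.List.pyGetD k 0 "" == w1) =
      (decide (2 ≤ k.length) && (PySem.List.pyGetD k 0 "" == w1)) := by
    intro k hk
    obtain ⟨v, hkv⟩ := pfs_mem_keys_ofList hk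
    obtain ⟨hne, hlen⟩ := hbf _ hkv
    by_cases h2 : 2 ≤ k.length
    · simp [h2]
    · have h0 : (PySem.List.pyGetD k 0 "" == w1) = false := by
        rw [pfs_pyGetD_zero_headI hne]
        by_cases he : k.headI = w1
        · exact absurd (hlen (he ▸ hw1)) h2
        · simp [he]
      simp [h2, h0]
  rw [pfs_table_get (PySem.Dict.ofList tf) (PySem.Dict.nodup_keys_ofList tf)
        (fun k => decide (3 ≤ k.length))
        (fun k => (PySem.List.pyGetD k 0 "", PySem.List.pyGetD k 2 "")) (w1, w2)
        (fun t => PySem.List.pyGetD t 0 "" == w1 && PySem.List.pyGetD t 2 "" == w2) hpredT,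
      pfs_table_get (PySem.Dict.ofList bf) (PySem.Dict.nodup_keys_ofList bf)
        (fun k => decide (2 ≤ k.length))
        (fun k => PySem.List.pyGetD k 0 "") w1
        (fun b => PySem.List.pyGetD b 0 "" == w1) hpredB]
  rw [pfs_predict_word_between]
  cases hT : PySem.List.max?
      ((PySem.Dict.ofList tf).keys.filter
        (fun t => PySem.List.pyGetD t 0 "" == w1 && PySem.List.pyGetD t 2 "" == w2))
      (fun t => (PySem.Dict.ofList tf).getD t 0) with
  | some best => simp
  | none =>
    simp only [Option.map_none]
    cases hB : PySem.List.max?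
        ((PySem.Dict.ofList bf).keys.filter (fun b => PySem.List.pyGetD b 0 "" == w1))
        (fun b => (PySem.Dict.ofList bf).getD b 0) with
    | some best => simp
    | none => simp

-- the pairs B zips are exactly the indexed pairs A walks
lemma pfs_zip_eq_range (words : List String) :
    words.zip (words.drop 1) =
    (List.range (words.length - 1)).map
      (fun i => (words.getD i "", words.getD (i + 1) "")) := by
  apply List.ext_getElem
  · simp only [List.length_zip, List.length_drop, List.length_map, List.length_range]; omega
  · intro i h1 h2
    simp only [List.length_zip, List.length_drop] at h1
    have hi1 : i < words.length := by omega
    have hi2 : i + 1 < words.length := by omega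
    simp [List.getElem_zip, hi1, hi2]

-- ===== VERDICT (by name: the statement is the Claim_ definition above) =====
theorem predict_full_sentence_spec : Claim_equal_predict_full_sentence := by
  intro words trigram_freq bigram_freq _ hpre
  obtain ⟨-, htf, hbf⟩ := hpre
  unfold Spec_predict_full_sentence
  simp only [predict_full_sentence, predict_full_sentence_alt]
  rw [pfs_zip_eq_range, List.foldl_map]
  refine congrArg (PySem.Str.join " ") ?_
  apply List.foldl_ext
  intro res i hi
  have hi' : i < words.length - 1 := List.mem_range.mp hi
  have hi1 : i < words.length := by omega
  have h1 : PySem.List.pyGetD words (i : Int) "" = words.getD i "" :=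
    PySem.List.pyGetD_natCast words i ""
  have h2 : PySem.List.pyGetD words ((i : Int) + 1) "" = words.getD (i + 1) "" := by
    have hc : ((i : Int) + 1) = ((i + 1 : Nat) : Int) := by push_cast; ring
    rw [hc]; exact PySem.List.pyGetD_natCast words (i + 1) ""
  have hw1 : PySem.List.pyGetD words (i : Int) "" ∈ words.dropLast := by
    rw [h1, List.getD_eq_getElem words "" hi1]
    have hdl : i < words.dropLast.length := by
      simp only [List.length_dropLast]; omega
    have := List.getElem_dropLast hdl
    rw [← this]
    exact List.getElem_mem hdl
  rw [pfs_pair_eq _ _ _ _ words hw1 htf hbf, h1, h2]
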